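-- pv_equiv track=rewrite | github.com/pnnv/hyprland-dotfiles | VSCodium/User/History/-77d32fd6/PVLB.py | max_subsegments
-- ===== SOURCE A (Python) =====
-- def max_subsegments(S, T, K):
--     N = len(S)
--     dp = [[0 for _ in range(K + 1)] for _ in range(N + 1)]
--
--     for i in range(1, N + 1):
--         for k in range(K + 1):
--             dp[i][k] = dp[i-1][k]
--             if S[i-1] == T[0]:
--                 dp[i][k] = max(dp[i][k], dp[i-1][k] + 1)
--             if k > 0:
--                 dp[i][k] = max(dp[i][k], dp[i-1][k-1] + 1)
--
--     return max(dp[N])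
-- ===== SOURCE B (Python) =====
-- def max_subsegments(S, T, K):
--     t = T[0]
--     matches = 0
--     for ch in S:
--         if ch == t:
--             matches += 1
--     return min(len(S), matches + K)
-- ===== Notes on version B (the rewrite author's own statement) =====
-- stated objective: faster
-- what changed: Replaces the O(N*K) dynamic-programming table with a single counting pass using the closed form min(len(S), count_of_T[0]_in_S + K).
-- outside the precondition, e.g. on max_subsegments('', '', 0): A returns 0, B raises IndexError; on max_subsegments('a', 'a', -1): A raises ValueError, B returns 0; on max_subsegments('ab', '', 2): A raises IndexError, B raises IndexError
import Mathlib
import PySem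

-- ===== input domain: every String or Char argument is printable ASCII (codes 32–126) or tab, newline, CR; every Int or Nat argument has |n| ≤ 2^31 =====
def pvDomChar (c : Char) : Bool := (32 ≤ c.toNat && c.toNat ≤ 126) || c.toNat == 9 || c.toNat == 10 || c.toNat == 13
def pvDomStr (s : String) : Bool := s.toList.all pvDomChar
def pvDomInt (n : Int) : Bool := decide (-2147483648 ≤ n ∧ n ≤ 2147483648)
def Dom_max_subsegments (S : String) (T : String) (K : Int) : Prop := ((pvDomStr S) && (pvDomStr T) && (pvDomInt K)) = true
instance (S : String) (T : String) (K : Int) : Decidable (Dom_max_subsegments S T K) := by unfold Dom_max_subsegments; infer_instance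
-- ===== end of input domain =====

-- B replaces A's O(N·K) dynamic-programming table by a single counting pass: the answer is min(N, matches + K).

-- ===== PORT A =====
-- literal transliteration of A's DP: the outer loop carries the previous dp row,
-- the inner loop builds dp[i] from dp[i-1] cell by cell; the result is max(dp[N]).
def max_subsegments (S : String) (T : String) (K : Int) : Int :=
  let N : Int := PySem.Str.len S
  let row0 : List Int := (PySem.List.pyRange 0 (K + 1) 1).map (fun _ => 0)
  let final : List Int :=
    (PySem.List.pyRange 1 (N + 1) 1).foldl (fun prev i =>
      (PySem.List.pyRange 0 (K + 1) 1).foldl (fun row k =>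
        let v1 := PySem.List.pyGetD prev k 0
        let v2 := if ((PySem.Str.pyGet? S (i - 1)).getD ' ') == ((PySem.Str.pyGet? T 0).getD ' ')
                  then max v1 (PySem.List.pyGetD prev k 0 + 1) else v1
        let v3 := if 0 < k then max v2 (PySem.List.pyGetD prev (k - 1) 0 + 1) else v2
        row ++ [v3]) []) row0
  (PySem.List.max? final (fun x => x)).getD 0

-- ===== PORT B =====
def max_subsegments_alt (S : String) (T : String) (K : Int) : Int :=
  let t : Char := (PySem.Str.pyGet? T 0).getD ' '
  let cnt : Int := S.toList.foldl (fun acc ch => if ch == t then acc + 1 else acc) 0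
  min (PySem.Str.len S) (cnt + K)

-- ===== PRECONDITION & SPEC =====
-- Pre_ excludes K < 0 (A raises ValueError: max of an empty dp row) and empty T (both
-- programs raise IndexError on T[0], except the degenerate S = "" ∧ T = "" ∧ K ≥ 0 corner,
-- where A never touches T[0] and returns 0 while B still raises IndexError).
def Pre_max_subsegments (S : String) (T : String) (K : Int) : Prop := T ≠ "" ∧ 0 ≤ K
instance (S : String) (T : String) (K : Int) : Decidable (Pre_max_subsegments S T K) := by unfold Pre_max_subsegments; infer_instance
def pvWitness_max_subsegments : String × String × Int := ("abcab", "a", 2)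

def Spec_max_subsegments (S : String) (T : String) (K : Int) (out : Int) : Prop := out = max_subsegments_alt S T K
instance (S : String) (T : String) (K : Int) (out : Int) : Decidable (Spec_max_subsegments S T K out) := by unfold Spec_max_subsegments; infer_instance

-- ===== CLAIM (what is proved, stated in full; the proofs are below) =====
def Claim_equal_max_subsegments : Prop := ∀ (S : String) (T : String) (K : Int), Dom_max_subsegments S T K → Pre_max_subsegments S T K → Spec_max_subsegments S T K (max_subsegments S T K)

-- ===== LEMMAS AND PROOFS =====

-- dp-row invariant: after processing the first n characters, the row is k ↦ min n (mₙ + k),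
-- where mₙ counts matches of t in the first n characters.  (Stated and proved below.)

theorem pv_inner_step (S T : String) (K : Int) (n : Nat) (m : Int)
    (hmn : m ≤ (n : Int)) (i : Int)
    (b : Bool) (hb : (((PySem.Str.pyGet? S (i - 1)).getD ' ') == ((PySem.Str.pyGet? T 0).getD ' ')) = b) :
    (PySem.List.pyRange 0 (K + 1) 1).foldl (fun row k =>
        let v1 := PySem.List.pyGetD ((PySem.List.pyRange 0 (K + 1) 1).map (fun k => min (n : Int) (m + k))) k 0
        let v2 := if ((PySem.Str.pyGet? S (i - 1)).getD ' ') == ((PySem.Str.pyGet? T 0).getD ' ')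
                  then max v1 (PySem.List.pyGetD ((PySem.List.pyRange 0 (K + 1) 1).map (fun k => min (n : Int) (m + k))) k 0 + 1) else v1
        let v3 := if 0 < k then max v2 (PySem.List.pyGetD ((PySem.List.pyRange 0 (K + 1) 1).map (fun k => min (n : Int) (m + k))) (k - 1) 0 + 1) else v2
        row ++ [v3]) []
    = (PySem.List.pyRange 0 (K + 1) 1).map
        (fun k => min ((n : Int) + 1) ((m + (if b then 1 else 0)) + k)) := by
  rw [PySem.List.foldl_append_singleton_eq_map]
  apply List.map_congr_left
  intro k hk
  rw [PySem.List.mem_pyRange_one] at hk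
  rw [hb]
  rw [PySem.List.pyGetD_map_pyRange_of_nonneg _ _ _ _ hk.1 hk.2]
  by_cases h0 : 0 < k
  · rw [PySem.List.pyGetD_map_pyRange_of_nonneg _ _ _ _ (by omega) (by omega)]
    cases b <;> simp [h0] <;> omega
  · cases b <;> simp [h0] <;> omega

theorem pv_outer (S T : String) (K : Int) (n : Nat) (hn : n ≤ S.toList.length) :
    (PySem.List.pyRange 1 ((n : Int) + 1) 1).foldl (fun prev i =>
      (PySem.List.pyRange 0 (K + 1) 1).foldl (fun row k =>
        let v1 := PySem.List.pyGetD prev k 0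
        let v2 := if ((PySem.Str.pyGet? S (i - 1)).getD ' ') == ((PySem.Str.pyGet? T 0).getD ' ')
                  then max v1 (PySem.List.pyGetD prev k 0 + 1) else v1
        let v3 := if 0 < k then max v2 (PySem.List.pyGetD prev (k - 1) 0 + 1) else v2
        row ++ [v3]) []) ((PySem.List.pyRange 0 (K + 1) 1).map (fun _ => 0))
    = (PySem.List.pyRange 0 (K + 1) 1).map
        (fun k => min (n : Int) (((S.toList.take n).count ((PySem.Str.pyGet? T 0).getD ' ') : Int) + k)) := by
  induction n with
  | zero =>
      have h0 : PySem.List.pyRange 1 (((0 : Nat) : Int) + 1) 1 = [] :=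
        PySem.List.pyRange_one_eq_nil (by norm_num)
      rw [h0]
      simp only [List.foldl_nil]
      apply List.map_congr_left
      intro k hk
      rw [PySem.List.mem_pyRange_one] at hk
      simp; omega
  | succ n ih =>
      have hn' : n ≤ S.toList.length := by omega
      have hsplit : PySem.List.pyRange 1 ((↑(n + 1) : Int) + 1) 1
          = PySem.List.pyRange 1 ((n : Int) + 1) 1 ++ [(n : Int) + 1] := by
        push_cast
        exact PySem.List.pyRange_one_succ_right (by omega)
      rw [hsplit, List.foldl_append, ih hn']
      simp only [List.foldl_cons, List.foldl_nil]
      have hget : PySem.Str.pyGet? S ((n : Int) + 1 - 1) = some (S.toList[n]'(by omega)) := by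
        rw [show (n : Int) + 1 - 1 = (n : Int) by ring]
        simp [List.getElem?_eq_getElem (by omega : n < S.toList.length)]
      set t : Char := (PySem.Str.pyGet? T 0).getD ' ' with ht
      set c : Char := S.toList[n]'(by omega) with hc
      have hcount : ((S.toList.take (n + 1)).count t : Int)
          = ((S.toList.take n).count t : Int) + (if (c == t) then 1 else 0) := by
        rw [List.take_add_one]
        simp [List.getElem?_eq_getElem (by omega : n < S.toList.length), List.count_append, ← hc]
        by_cases h : c = t <;> simp [h]
      have hmatch : (((PySem.Str.pyGet? S ((n : Int) + 1 - 1)).getD ' ') == t) = (c == t) := by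
        rw [hget]; rfl
      rw [pv_inner_step S T K n ((S.toList.take n).count t : Int)
            (by exact_mod_cast Nat.le_trans (List.count_le_length) (by rw [List.length_take]; omega))
            ((n : Int) + 1) (c == t) hmatch]
      rw [hcount]
      push_cast
      rfl

theorem pv_max_row (N m K : Int) (hK : 0 ≤ K) :
    (PySem.List.max? ((PySem.List.pyRange 0 (K + 1) 1).map (fun k => min N (m + k))) (fun x => x)).getD 0
      = min N (m + K) := by
  set L := (PySem.List.pyRange 0 (K + 1) 1).map (fun k => min N (m + k)) with hL
  have hne : L ≠ [] := by
    simp [hL, ← List.length_eq_zero_iff, PySem.List.length_pyRange_one]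
    omega
  cases hmax : PySem.List.max? L (fun x => x) with
  | none => exact absurd ((PySem.List.max?_eq_none_iff L (fun x => x)).mp hmax) hne
  | some v =>
      have hvmem : v ∈ L := PySem.List.max?_mem hmax
      have hmaxv := PySem.List.max?_isMax hmax
      have hKL : min N (m + K) ∈ L := by
        rw [hL]
        exact List.mem_map.mpr ⟨K, PySem.List.mem_pyRange_one.mpr ⟨hK, by omega⟩, rfl⟩
      have h1 : min N (m + K) ≤ v := hmaxv _ hKL
      have h2 : v ≤ min N (m + K) := by
        rw [hL] at hvmem
        obtain ⟨k, hk, rfl⟩ := List.mem_map.mp hvmem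
        rw [PySem.List.mem_pyRange_one] at hk
        omega
      simp
      omega

-- ===== VERDICT (by name: the statement is the Claim_ definition above) =====
theorem max_subsegments_spec : Claim_equal_max_subsegments := by
  intro S T K _ hPre
  obtain ⟨hT, hK⟩ := hPre
  unfold Spec_max_subsegments max_subsegments max_subsegments_alt
  have hlen : PySem.Str.len S = (S.toList.length : Int) := by
    simp [PySem.Str.len_eq]
  simp only [hlen]
  rw [pv_outer S T K S.toList.length (le_refl _)]
  rw [pv_max_row _ _ _ hK]
  rw [List.take_length, PySem.List.foldl_beq_add_one]
  omega
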